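-- pv_equiv track=rewrite | github.com/dalleng/adventofcode | 2023/day12/main.py | get_possible_replacements
-- ===== SOURCE A (Python) =====
-- from typing import Generator
--
-- def get_possible_replacements(row: str, positions: list[int]) -> Generator[str, None, None]:
--     to_process = [(row, positions)]
--     while to_process:
--         current_row, current_positions = to_process.pop()
--         if not current_positions:
--             yield current_row
--         else:
--             for c in (".", "#"):
--                 pos = current_positions[0]
--                 new_row = current_row[:pos] + c + current_row[pos+1:]
--                 to_process.append((new_row, current_positions[1:]))
-- ===== SOURCE B (Python) =====
-- def get_possible_replacements(row: str, positions: list[int]):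
--     if not positions:
--         yield row
--         return
--     pos = positions[0]
--     for c in ("#", "."):
--         new_row = row[:pos] + c + row[pos+1:]
--         yield from get_possible_replacements(new_row, positions[1:])
-- ===== Notes on version B (the rewrite author's own statement) =====
-- stated objective: idiomatic
-- what changed: Replaced the explicit worklist stack (append two states, pop the last) with a direct recursive generator that recurses on the tail of positions, iterating '#' then '.' to preserve the yield order.
import Mathlib
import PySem

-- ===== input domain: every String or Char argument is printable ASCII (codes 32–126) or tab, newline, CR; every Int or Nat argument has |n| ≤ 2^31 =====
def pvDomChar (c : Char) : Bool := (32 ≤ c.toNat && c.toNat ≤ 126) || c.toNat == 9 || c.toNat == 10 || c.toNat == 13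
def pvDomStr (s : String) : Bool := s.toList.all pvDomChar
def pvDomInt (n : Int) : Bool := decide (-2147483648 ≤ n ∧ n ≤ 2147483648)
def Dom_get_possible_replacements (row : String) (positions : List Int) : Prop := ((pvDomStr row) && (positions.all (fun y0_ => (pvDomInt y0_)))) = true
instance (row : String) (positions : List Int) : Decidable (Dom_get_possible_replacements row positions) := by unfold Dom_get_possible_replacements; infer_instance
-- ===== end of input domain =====

-- B replaces A's explicit worklist stack by a direct recursive generator over the positions list (same yield order); return-value equivalence is proved, no objective beyond clarity.

-- ===== PORT A =====
-- the common Python expression row[:pos] + c + row[pos+1:] (exact: PySem slices on code points)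
def pvSubst (row : String) (pos : Int) (c : Char) : String :=
  String.ofList (PySem.List.slice row.toList none (some pos) ++ [c] ++
                 PySem.List.slice row.toList (some (pos + 1)) none)

-- A's while-loop over the stack `to_process`; head of the list = top of the stack
-- (Python appends '.', then '#', then pops the last, so '#' is pushed as the new head).
def pvRunStack : List (String × List Int) → List String
  | [] => []
  | (row, []) :: rest => row :: pvRunStack rest
  | (row, pos :: tl) :: rest =>
      pvRunStack ((pvSubst row pos '#', tl) :: (pvSubst row pos '.', tl) :: rest)
termination_by stack => (stack.map (fun p => 3 ^ p.2.length)).sum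
decreasing_by
  · simp
  · simp only [List.map_cons, List.sum_cons, List.length_cons]
    have h : 0 < 3 ^ tl.length := pow_pos (by omega) tl.length
    omega

def get_possible_replacements (row : String) (positions : List Int) : List String :=
  pvRunStack [(row, positions)]

-- ===== PORT B =====
def get_possible_replacements_alt (row : String) (positions : List Int) : List String :=
  match positions with
  | [] => [row]
  | pos :: rest =>
      ['#', '.'].flatMap (fun c => get_possible_replacements_alt (pvSubst row pos c) rest)

-- ===== PRECONDITION & SPEC =====
def Spec_get_possible_replacements (row : String) (positions : List Int) (out : List String) : Prop := out = get_possible_replacements_alt row positions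
instance (row : String) (positions : List Int) (out : List String) : Decidable (Spec_get_possible_replacements row positions out) := by unfold Spec_get_possible_replacements; infer_instance

-- ===== CLAIM (what is proved, stated in full; the proofs are below) =====
def Claim_equal_get_possible_replacements : Prop := ∀ (row : String) (positions : List Int), Dom_get_possible_replacements row positions → Spec_get_possible_replacements row positions (get_possible_replacements row positions)

-- ===== LEMMAS AND PROOFS =====

-- popping one stack frame produces B's output for that frame, then the rest of the stack
theorem pvRunStack_cons (ps : List Int) (row : String) (rest : List (String × List Int)) :
    pvRunStack ((row, ps) :: rest) = get_possible_replacements_alt row ps ++ pvRunStack rest := by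
  induction ps generalizing row rest with
  | nil => simp [pvRunStack, get_possible_replacements_alt]
  | cons pos tl ih =>
      rw [pvRunStack.eq_3, ih, ih]
      simp [get_possible_replacements_alt, List.flatMap]

-- ===== VERDICT (by name: the statement is the Claim_ definition above) =====
theorem get_possible_replacements_spec : Claim_equal_get_possible_replacements := by
  intro row positions _
  unfold Spec_get_possible_replacements get_possible_replacements
  rw [pvRunStack_cons]
  simp [pvRunStack]
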